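-- pv_equiv track=rewrite | github.com/mitro42/advent_of_code | 2015/19.py | create_new_molecules
-- ===== SOURCE A (Python) =====
-- def create_new_molecules(sub, molecule):
--     ret = set()
--     idx = molecule.find(sub[0])
--     while idx != -1:
--         m = molecule[:idx] + sub[1] + molecule[idx + len(sub[0]):]
--         ret.add(m)
--         idx = molecule.find(sub[0], idx + 1)
--     return ret
-- ===== SOURCE B (Python) =====
-- def create_new_molecules(sub, molecule):
--     # Rabin-Karp: a rolling hash mod 2**61-1 selects candidate positions in O(1)
--     # per position; candidates are verified by one slice comparison.
--     p, r = sub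
--     m = len(p)
--     n = len(molecule)
--     if m == 0:
--         return {molecule[:i] + r + molecule[i:] for i in range(n + 1)}
--     if m > n:
--         return set()
--     M = (1 << 61) - 1
--     B = 1114112
--     hp = 0
--     for c in p:
--         hp = (hp * B + ord(c)) % M
--     h = 0
--     for c in molecule[:m]:
--         h = (h * B + ord(c)) % M
--     power = pow(B, m - 1, M)
--     ret = set()
--     if h == hp and molecule[:m] == p:
--         ret.add(r + molecule[m:])
--     for i, (cold, cnew) in enumerate(zip(molecule, molecule[m:])):
--         h = ((h - ord(cold) * power) * B + ord(cnew)) % M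
--         if h == hp and molecule[i + 1:i + 1 + m] == p:
--             ret.add(molecule[:i + 1] + r + molecule[i + 1 + m:])
--     return ret
-- ===== Notes on version B (the rewrite author's own statement) =====
-- stated objective: alternative
-- what changed: Replaces A's repeated molecule.find(sub[0], idx+1) substring searches with Rabin-Karp: a rolling hash mod 2**61-1 in base 1114112 is updated in O(1) per position, and positions whose hash matches the pattern's are verified by a single slice comparison before the replacement string is built.
import Mathlib
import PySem

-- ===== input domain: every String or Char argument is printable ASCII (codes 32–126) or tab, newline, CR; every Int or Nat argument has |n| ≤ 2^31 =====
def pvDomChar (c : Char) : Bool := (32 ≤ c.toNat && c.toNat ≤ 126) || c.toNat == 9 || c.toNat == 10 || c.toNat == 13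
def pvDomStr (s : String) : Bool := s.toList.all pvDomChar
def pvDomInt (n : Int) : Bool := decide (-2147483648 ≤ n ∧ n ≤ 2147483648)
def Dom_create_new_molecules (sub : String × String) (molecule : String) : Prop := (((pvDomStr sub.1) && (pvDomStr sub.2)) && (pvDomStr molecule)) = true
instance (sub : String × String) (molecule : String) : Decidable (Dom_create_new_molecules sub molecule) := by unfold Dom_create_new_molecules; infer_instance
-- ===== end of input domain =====

-- B replaces A's repeated substring searches (molecule.find(sub[0], idx+1)) with a Rabin-Karp
-- rolling hash mod 2^61-1 whose candidates are verified by a slice comparison (alternative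
-- algorithm; same results; no speed claim).

-- ===== PORT A =====
-- A's 'while idx != -1' loop; the fuel argument only makes the recursion total
-- (molecule.length + 2 steps always suffice, proved below).
def cnmA_loop (sub : String × String) (molecule : String) (ret : PySem.Set String) (idx : Int) : Nat → PySem.Set String
  | 0 => ret
  | fuel + 1 =>
    if idx = -1 then ret
    else
      let m := PySem.Str.slice molecule none (some idx) ++ sub.2 ++
               PySem.Str.slice molecule (some (idx + PySem.Str.len sub.1)) none
      cnmA_loop sub molecule (PySem.Set.add ret m) (PySem.Str.findFrom molecule sub.1 (idx + 1) none) fuel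

def create_new_molecules (sub : String × String) (molecule : String) : List String :=
  cnmA_loop sub molecule PySem.Set.empty (PySem.Str.find molecule sub.1) (molecule.toList.length + 2)

-- ===== PORT B =====
-- Source B's Rabin-Karp: rolling hash mod 2**61-1 in base 1114112; candidate positions (hash hit)
-- are verified by a slice comparison. ord(c) is ported as (c.toNat : Int); the loop
-- 'for c in molecule[:m]' is the foldl over molecule.toList.take m (exact: it visits exactly
-- the first m characters); '(1 << 61) - 1' is the literal it evaluates to.
def cnmB_M : Int := 2305843009213693951

def cnmB_hash (l : List Char) : Int :=
  l.foldl (fun a c => PySem.Int.mod (a * 1114112 + (c.toNat : Int)) cnmB_M) 0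

-- one iteration of Source B's 'for i, (cold, cnew) in enumerate(zip(molecule, molecule[m:]))' loop
def cnmB_step (sub : String × String) (molecule : String) (power hp : Int)
    (st : PySem.Set String × Int) (e : Int × Char × Char) : PySem.Set String × Int :=
  let h := PySem.Int.mod
    ((st.2 - (e.2.1.toNat : Int) * power) * 1114112 + (e.2.2.toNat : Int)) cnmB_M
  let ret := if h = hp ∧
      PySem.Str.slice molecule (some (e.1 + 1))
        (some (e.1 + 1 + PySem.Str.len sub.1)) = sub.1 then
      PySem.Set.add st.1
        (PySem.Str.slice molecule none (some (e.1 + 1)) ++ sub.2 ++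
         PySem.Str.slice molecule (some (e.1 + 1 + PySem.Str.len sub.1)) none)
    else st.1
  (ret, h)

def create_new_molecules_alt (sub : String × String) (molecule : String) : List String :=
  let m := sub.1.toList.length
  let n := molecule.toList.length
  if m = 0 then
    PySem.Set.ofList ((PySem.List.pyRange 0 ((n : Int) + 1)).map (fun i =>
      PySem.Str.slice molecule none (some i) ++ sub.2 ++ PySem.Str.slice molecule (some i) none))
  else if n < m then PySem.Set.empty
  else
    let hp := cnmB_hash sub.1.toList
    let h0 := cnmB_hash (molecule.toList.take m)
    let power := PySem.Int.powMod 1114112 (m - 1) cnmB_M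
    let ret0 : PySem.Set String :=
      if h0 = hp ∧ PySem.Str.slice molecule none (some (m : Int)) = sub.1 then
        PySem.Set.add PySem.Set.empty (sub.2 ++ PySem.Str.slice molecule (some (m : Int)) none)
      else PySem.Set.empty
    ((PySem.List.enumerate (List.zip molecule.toList (molecule.toList.drop m)) 0).foldl
        (cnmB_step sub molecule power hp) (ret0, h0)).1

-- ===== PRECONDITION & SPEC =====
def Spec_create_new_molecules (sub : String × String) (molecule : String) (out : List String) : Prop := out = create_new_molecules_alt sub molecule
instance (sub : String × String) (molecule : String) (out : List String) : Decidable (Spec_create_new_molecules sub molecule out) := by unfold Spec_create_new_molecules; infer_instance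

-- ===== CLAIM (what is proved, stated in full; the proofs are below) =====
def Claim_equal_create_new_molecules : Prop := ∀ (sub : String × String) (molecule : String), Dom_create_new_molecules sub molecule → Spec_create_new_molecules sub molecule (create_new_molecules sub molecule)

-- ===== LEMMAS AND PROOFS =====

-- the molecule built from a replacement at position i
def pvBuild (sub : String × String) (molecule : String) (i : Int) : String :=
  PySem.Str.slice molecule none (some i) ++ sub.2 ++
  PySem.Str.slice molecule (some (i + PySem.Str.len sub.1)) none

-- the replacement molecules for match positions in [k, len], in increasing order
def pvElems (sub : String × String) (molecule : String) (k : Nat) : List String :=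
  ((List.range' k (molecule.toList.length + 1 - k)).filter
      (fun i => PySem.Chars.startswith (molecule.toList.drop i) sub.1.toList)).map
    (fun (i : Nat) => pvBuild sub molecule ((i : Nat) : Int))

lemma pvFindFrom_past (s sub : List Char) :
    PySem.Chars.findFrom s sub ((s.length : Int) + 1) none = -1 := by
  simp only [PySem.Chars.findFrom]
  rw [if_neg (show ¬ ((s.length : Int) + 1 < 0) by omega),
    if_pos (show (s.length : Int) < (s.length : Int) + 1 by omega)]

lemma pvNoMatch {s0 mol : List Char} {k : Nat}
    (h : ¬ s0 <:+: mol.drop k) {i : Nat} (hk : k ≤ i) : ¬ s0 <+: mol.drop i := by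
  intro hp
  apply h
  have : mol.drop i = (mol.drop k).drop (i - k) := by
    rw [List.drop_drop]; congr 1; omega
  rw [this] at hp
  exact hp.isInfix.trans (List.drop_suffix _ _).isInfix

lemma pvLoop_eq (sub : String × String) (molecule : String) :
    ∀ (fuel k : Nat) (ret : PySem.Set String), k ≤ molecule.toList.length + 1 →
      molecule.toList.length + 1 - k < fuel →
      cnmA_loop sub molecule ret
          (PySem.Chars.findFrom molecule.toList sub.1.toList (k : Int) none) fuel
        = PySem.Set.update ret (pvElems sub molecule k) := by
  intro fuel
  induction fuel with
  | zero => intro k ret _ hf; omega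
  | succ fuel ih =>
    intro k ret hk hf
    by_cases hk1 : k = molecule.toList.length + 1
    · subst hk1
      rw [show ((molecule.toList.length + 1 : Nat) : Int) = (molecule.toList.length : Int) + 1
          by push_cast; ring, pvFindFrom_past]
      unfold pvElems
      rw [Nat.sub_self]
      rfl
    · have hkn : k ≤ molecule.toList.length := by omega
      by_cases hF : PySem.Chars.findFrom molecule.toList sub.1.toList (k : Int) none = -1
      · have hinf : ¬ sub.1.toList <:+: molecule.toList.drop k :=
          (PySem.Chars.findFrom_natCast_eq_neg_one_iff molecule.toList sub.1.toList k hkn).mp hF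
        have hfil : (List.range' k (molecule.toList.length + 1 - k)).filter
            (fun i => PySem.Chars.startswith (molecule.toList.drop i) sub.1.toList) = [] := by
          rw [List.filter_eq_nil_iff]
          intro i hi
          have hik : k ≤ i := (List.mem_range'_1.mp hi).1
          rw [PySem.Chars.startswith_iff]
          exact pvNoMatch hinf hik
        rw [hF]
        unfold pvElems
        rw [hfil]
        rfl
      · obtain ⟨hge, hpre, hmin⟩ :=
          PySem.Chars.findFrom_natCast_spec molecule.toList sub.1.toList k hkn hF
        set F := PySem.Chars.findFrom molecule.toList sub.1.toList (k : Int) none with hFdef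
        have hF0 : 0 ≤ F := le_trans (by exact_mod_cast Nat.zero_le k) hge
        set p := F.toNat with hp
        have hFp : F = (p : Int) := by omega
        have hkp : k ≤ p := by omega
        have hpn : p ≤ molecule.toList.length := by
          have hnc := PySem.Chars.findFrom_natCast molecule.toList sub.1.toList k hkn
          rw [← hFdef] at hnc
          by_cases hfind : PySem.Chars.find (molecule.toList.drop k) sub.1.toList = -1
          · rw [if_pos hfind] at hnc; exact absurd hnc hF
          · rw [if_neg hfind] at hnc
            have hle := PySem.Chars.find_le_length (molecule.toList.drop k) sub.1.toList
            rw [List.length_drop] at hle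
            omega
        have hstep : cnmA_loop sub molecule ret F (fuel + 1)
            = cnmA_loop sub molecule (PySem.Set.add ret (pvBuild sub molecule F))
                (PySem.Str.findFrom molecule sub.1 (F + 1) none) fuel := by
          simp only [cnmA_loop, if_neg hF]
          rfl
        rw [hstep, PySem.Str.findFrom_eq, hFp,
          show ((p : Int) + 1) = ((p + 1 : Nat) : Int) by push_cast; ring,
          ih (p + 1) _ (by omega) (by omega)]
        have hsplit : pvElems sub molecule k
            = pvBuild sub molecule (p : Int) :: pvElems sub molecule (p + 1) := by
          unfold pvElems
          have happ := List.range'_append (s := k) (m := p - k)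
            (n := molecule.toList.length + 1 - p) (step := 1)
          rw [show k + 1 * (p - k) = p by omega] at happ
          rw [show molecule.toList.length + 1 - k = (p - k) + (molecule.toList.length + 1 - p)
              by omega, ← happ, List.filter_append]
          have h2 : (List.range' k (p - k)).filter
              (fun i => PySem.Chars.startswith (molecule.toList.drop i) sub.1.toList) = [] := by
            rw [List.filter_eq_nil_iff]
            intro i hi
            obtain ⟨hik, hilt⟩ := List.mem_range'_1.mp hi
            rw [PySem.Chars.startswith_iff]
            exact hmin i hik (by omega)
          rw [h2, List.nil_append,
            show molecule.toList.length + 1 - p = (molecule.toList.length + 1 - (p + 1)) + 1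
              by omega,
            List.range'_succ, List.filter_cons,
            if_pos (show PySem.Chars.startswith (molecule.toList.drop p) sub.1.toList = true
              by rw [PySem.Chars.startswith_iff]; exact hpre),
            List.map_cons]
        rw [hsplit]
        rfl

lemma pvPyRange_eq (m a : Nat) :
    PySem.List.pyRange (a : Int) ((a + m : Nat) : Int)
      = (List.range' a m).map (fun (i : Nat) => ((i : Nat) : Int)) := by
  induction m generalizing a with
  | zero =>
    rw [show ((a + 0 : Nat) : Int) = (a : Int) by push_cast; ring]
    simp [PySem.List.pyRange]
  | succ m ih =>
    rw [PySem.List.pyRange_one_cons (by push_cast; omega), List.range'_succ, List.map_cons,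
      show ((a : Int) + 1) = ((a + 1 : Nat) : Int) by push_cast; ring,
      show ((a + (m + 1) : Nat) : Int) = (((a + 1) + m : Nat) : Int) by push_cast; ring,
      ih (a + 1)]

-- the exact (unreduced) base-1114112 value of a character list
def pvEnc (l : List Char) : Int := l.foldl (fun a c => a * 1114112 + (c.toNat : Int)) 0

lemma pvM_pos : (0 : Int) < cnmB_M := by norm_num [cnmB_M]

lemma pvEnc_shift (l : List Char) (a : Int) :
    l.foldl (fun a c => a * 1114112 + (c.toNat : Int)) a
      = a * 1114112 ^ l.length + pvEnc l := by
  induction l generalizing a with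
  | nil => simp [pvEnc]
  | cons x l ih =>
    rw [List.foldl_cons, ih]
    have hx : pvEnc (x :: l) = (x.toNat : Int) * 1114112 ^ l.length + pvEnc l := by
      show List.foldl _ ((0:Int) * 1114112 + (x.toNat : Int)) l = _
      rw [show ((0:Int) * 1114112 + (x.toNat : Int)) = (x.toNat : Int) by ring, ih]
    rw [hx, List.length_cons]
    ring

lemma pvEnc_cons (x : Char) (l : List Char) :
    pvEnc (x :: l) = (x.toNat : Int) * 1114112 ^ l.length + pvEnc l := by
  show List.foldl _ ((0:Int) * 1114112 + (x.toNat : Int)) l = _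
  rw [show ((0:Int) * 1114112 + (x.toNat : Int)) = (x.toNat : Int) by ring, pvEnc_shift]

lemma pvEnc_append_singleton (l : List Char) (y : Char) :
    pvEnc (l ++ [y]) = pvEnc l * 1114112 + (y.toNat : Int) := by
  unfold pvEnc
  rw [List.foldl_append]
  rfl

-- the hash Source B maintains is the exact value reduced mod 2^61-1
lemma pvHash_eq (l : List Char) : cnmB_hash l = pvEnc l % cnmB_M := by
  induction l using List.reverseRecOn with
  | nil => simp [cnmB_hash, pvEnc]
  | append_singleton l y ih =>
    rw [cnmB_hash, List.foldl_append, List.foldl_cons, List.foldl_nil,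
      show List.foldl (fun a c => PySem.Int.mod (a * 1114112 + (c.toNat : Int)) cnmB_M) 0 l
        = cnmB_hash l from rfl,
      ih, PySem.Int.mod_eq_emod_of_pos pvM_pos, pvEnc_append_singleton]
    exact ((Int.mod_modEq (pvEnc l) cnmB_M).mul_right 1114112).add_right (y.toNat : Int)

-- the rolling update turns the exact value of window k into that of window k+1
lemma pvRoll (mol : List Char) (m k : Nat) (hm : 0 < m) (hk : k + m < mol.length) :
    (pvEnc ((mol.drop k).take m) - ((mol[k]'(by omega)).toNat : Int) * 1114112 ^ (m - 1)) * 1114112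
        + ((mol[k + m]'hk).toNat : Int)
      = pvEnc ((mol.drop (k + 1)).take m) := by
  obtain ⟨mm, rfl⟩ : ∃ mm, m = mm + 1 := ⟨m - 1, by omega⟩
  have hlen1 : mm < (mol.drop (k + 1)).length := by
    rw [List.length_drop]; omega
  have h1 : (mol.drop k).take (mm + 1) = mol[k]'(by omega) :: (mol.drop (k + 1)).take mm := by
    rw [List.drop_eq_getElem_cons (by omega), List.take_succ_cons]
  have h2 : (mol.drop (k + 1)).take (mm + 1)
      = (mol.drop (k + 1)).take mm ++ [mol[k + (mm + 1)]'hk] := by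
    rw [List.take_succ_eq_append_getElem hlen1]
    congr 1
    rw [List.getElem_drop]
    simp only [show k + 1 + mm = k + (mm + 1) by omega]
  have hlen2 : ((mol.drop (k + 1)).take mm).length = mm := by
    rw [List.length_take, List.length_drop]; omega
  rw [h1, h2, pvEnc_cons, pvEnc_append_singleton, hlen2]
  simp only [Nat.add_sub_cancel]
  ring

-- the rolling hash update, mod 2^61-1
lemma pvRollM (mol : List Char) (m k : Nat) (hm : 0 < m) (hk : k + m < mol.length) :
    PySem.Int.mod
        ((cnmB_hash ((mol.drop k).take m)
            - ((mol[k]'(by omega)).toNat : Int) * PySem.Int.powMod 1114112 (m - 1) cnmB_M) * 1114112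
          + ((mol[k + m]'hk).toNat : Int)) cnmB_M
      = cnmB_hash ((mol.drop (k + 1)).take m) := by
  rw [pvHash_eq, pvHash_eq, PySem.Int.powMod_eq_emod _ _ pvM_pos,
    PySem.Int.mod_eq_emod_of_pos pvM_pos, ← pvRoll mol m k hm hk]
  exact (((Int.mod_modEq (pvEnc ((mol.drop k).take m)) cnmB_M).sub
      ((Int.mod_modEq ((1114112:Int) ^ (m - 1)) cnmB_M).mul_left
        ((mol[k]'(by omega)).toNat : Int))).mul_right 1114112).add_right
    ((mol[k + m]'hk).toNat : Int)

-- no match can start where fewer than |pattern| characters remain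
lemma pvPredFalse (sub : String × String) (molecule : String) (i : Nat)
    (hm : 0 < sub.1.toList.length)
    (h : molecule.toList.length < i + sub.1.toList.length) :
    ¬ (PySem.Chars.startswith (molecule.toList.drop i) sub.1.toList = true) := by
  rw [PySem.Chars.startswith_iff]
  intro hp
  have := hp.length_le
  rw [List.length_drop] at this
  omega

-- matching at i is equality of the window at i with the pattern
lemma pvPredIff (sub : String × String) (molecule : String) (i : Nat) :
    (PySem.Chars.startswith (molecule.toList.drop i) sub.1.toList = true)
      ↔ (molecule.toList.drop i).take sub.1.toList.length = sub.1.toList := by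
  rw [PySem.Chars.startswith_iff, List.prefix_iff_eq_take]
  exact ⟨fun hp => hp.symm, fun hp => hp.symm⟩

-- Source B's verification slice is the window at i
lemma pvSliceIff (sub : String × String) (molecule : String) (i : Nat) :
    (PySem.Str.slice molecule (some ((i : Nat) : Int))
        (some (((i : Nat) : Int) + ((sub.1.toList.length : Nat) : Int))) = sub.1)
      ↔ (molecule.toList.drop i).take sub.1.toList.length = sub.1.toList := by
  rw [PySem.Str.slice,
    show PySem.Chars.slice molecule.toList (some ((i : Nat) : Int))
        (some (((i : Nat) : Int) + ((sub.1.toList.length : Nat) : Int)))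
      = (molecule.toList.drop i).take sub.1.toList.length from
      PySem.List.slice_natCast_add molecule.toList i sub.1.toList.length]
  constructor
  · intro h
    have h2 := congrArg String.toList h
    rwa [String.toList_ofList] at h2
  · intro h
    rw [h, String.ofList_toList]

-- Source B's combined test (hash hit AND verified slice) is the startswith test
lemma pvCondIff (sub : String × String) (molecule : String) (i : Nat) :
    (cnmB_hash ((molecule.toList.drop i).take sub.1.toList.length) = cnmB_hash sub.1.toList ∧
      PySem.Str.slice molecule (some ((i : Nat) : Int))
        (some (((i : Nat) : Int) + ((sub.1.toList.length : Nat) : Int))) = sub.1)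
      ↔ PySem.Chars.startswith (molecule.toList.drop i) sub.1.toList = true := by
  rw [pvSliceIff, pvPredIff]
  exact ⟨fun ⟨_, hs⟩ => hs, fun hw => ⟨by rw [hw], hw⟩⟩

-- Source B's main loop, processing windows k+1 .. k+cnt
set_option maxHeartbeats 1000000 in
lemma pvAltLoop (sub : String × String) (molecule : String)
    (hm : 0 < sub.1.toList.length) :
    ∀ (cnt k : Nat) (ret : PySem.Set String),
      k + sub.1.toList.length + cnt = molecule.toList.length →
      ((PySem.List.enumerate
            (List.zip (molecule.toList.drop k)
              (molecule.toList.drop (k + sub.1.toList.length))) (k : Int)).foldl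
          (cnmB_step sub molecule (PySem.Int.powMod 1114112 (sub.1.toList.length - 1) cnmB_M)
            (cnmB_hash sub.1.toList))
          (ret, cnmB_hash ((molecule.toList.drop k).take sub.1.toList.length))).1
        = PySem.Set.update ret
            (((List.range' (k + 1) cnt).filter
                (fun i => PySem.Chars.startswith (molecule.toList.drop i) sub.1.toList)).map
              (fun (i : Nat) => pvBuild sub molecule ((i : Nat) : Int))) := by
  intro cnt
  induction cnt with
  | zero =>
    intro k ret hcnt
    rw [show k + sub.1.toList.length = molecule.toList.length by omega]
    rw [List.drop_length, List.zip_nil_right]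
    rfl
  | succ cnt ih =>
    intro k ret hcnt
    have hkm : k + sub.1.toList.length < molecule.toList.length := by omega
    have hk : k < molecule.toList.length := by omega
    rw [List.drop_eq_getElem_cons hk, List.drop_eq_getElem_cons hkm, List.zip_cons_cons,
      PySem.List.enumerate_cons, List.foldl_cons]
    have hroll := pvRollM molecule.toList sub.1.toList.length k hm hkm
    have hstep : cnmB_step sub molecule (PySem.Int.powMod 1114112 (sub.1.toList.length - 1) cnmB_M)
        (cnmB_hash sub.1.toList)
        (ret, cnmB_hash ((molecule.toList[k]'hk :: molecule.toList.drop (k + 1)).take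
          sub.1.toList.length))
        ((k : Int), molecule.toList[k]'hk, molecule.toList[k + sub.1.toList.length]'hkm)
        = ((if cnmB_hash ((molecule.toList.drop (k + 1)).take sub.1.toList.length)
              = cnmB_hash sub.1.toList ∧
            PySem.Str.slice molecule (some ((k : Int) + 1))
              (some ((k : Int) + 1 + PySem.Str.len sub.1)) = sub.1
            then PySem.Set.add ret (pvBuild sub molecule ((k : Int) + 1))
            else ret),
           cnmB_hash ((molecule.toList.drop (k + 1)).take sub.1.toList.length)) := by
      rw [← List.drop_eq_getElem_cons hk]
      simp only [cnmB_step]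
      rw [hroll]
      rfl
    rw [hstep]
    have hcast : ((k : Int) + 1) = (((k + 1 : Nat) : Nat) : Int) := by push_cast; ring
    rw [hcast, PySem.Str.len_eq]
    have hiff := pvCondIff sub molecule (k + 1)
    rw [List.range'_succ, List.filter_cons]
    by_cases hsw : PySem.Chars.startswith (molecule.toList.drop (k + 1)) sub.1.toList = true
    · rw [if_pos (hiff.mpr hsw), if_pos hsw, List.map_cons, PySem.Set.update_cons]
      rw [show molecule.toList.drop (k + sub.1.toList.length + 1)
            = molecule.toList.drop ((k + 1) + sub.1.toList.length) by congr 1; omega]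
      exact ih (k + 1) _ (by omega)
    · rw [if_neg (fun hc => hsw (hiff.mp hc)), if_neg (by simpa using hsw)]
      rw [show molecule.toList.drop (k + sub.1.toList.length + 1)
            = molecule.toList.drop ((k + 1) + sub.1.toList.length) by congr 1; omega]
      exact ih (k + 1) _ (by omega)

-- an empty initial slice disappears
lemma pvSliceZero (s : String) (t u : String) :
    PySem.Str.slice s none (some 0) ++ t ++ u = t ++ u := by
  have h : PySem.Str.slice s none (some 0) = "" := by
    apply String.toList_inj.mp
    rw [PySem.Str.slice]
    rw [show PySem.Chars.slice s.toList none (some 0)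
        = List.take (0:Int).toNat s.toList from PySem.List.slice_to s.toList (by norm_num)]
    simp
  rw [h, String.empty_append]

-- the tail of the index range (where the pattern no longer fits) filters to nothing
lemma pvFilterShort (sub : String × String) (molecule : String)
    (hm : 0 < sub.1.toList.length) (hmn : sub.1.toList.length ≤ molecule.toList.length) :
    (List.range' 0 (molecule.toList.length + 1)).filter
        (fun i => PySem.Chars.startswith (molecule.toList.drop i) sub.1.toList)
      = (List.range' 0 (molecule.toList.length - sub.1.toList.length + 1)).filter
        (fun i => PySem.Chars.startswith (molecule.toList.drop i) sub.1.toList) := by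
  have happ := List.range'_append (s := 0)
    (m := molecule.toList.length - sub.1.toList.length + 1)
    (n := sub.1.toList.length) (step := 1)
  rw [show 0 + 1 * (molecule.toList.length - sub.1.toList.length + 1)
      = molecule.toList.length - sub.1.toList.length + 1 by omega] at happ
  rw [show molecule.toList.length + 1
      = (molecule.toList.length - sub.1.toList.length + 1) + sub.1.toList.length by omega,
    ← happ, List.filter_append]
  have h2 : (List.range' (molecule.toList.length - sub.1.toList.length + 1)
        sub.1.toList.length).filter
        (fun i => PySem.Chars.startswith (molecule.toList.drop i) sub.1.toList) = [] := by
    rw [List.filter_eq_nil_iff]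
    intro i hi
    obtain ⟨hik, _⟩ := List.mem_range'_1.mp hi
    exact pvPredFalse sub molecule i hm (by omega)
  rw [h2, List.append_nil]

set_option maxHeartbeats 1000000 in
lemma pvAlt_eq (sub : String × String) (molecule : String) :
    create_new_molecules_alt sub molecule = PySem.Set.ofList (pvElems sub molecule 0) := by
  simp only [create_new_molecules_alt]
  by_cases hm : sub.1.toList.length = 0
  · rw [if_pos hm]
    unfold pvElems
    have hfil : (List.range' 0 (molecule.toList.length + 1 - 0)).filter
        (fun i => PySem.Chars.startswith (molecule.toList.drop i) sub.1.toList)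
        = List.range' 0 (molecule.toList.length + 1 - 0) := by
      rw [List.filter_eq_self]
      intro i _
      rw [PySem.Chars.startswith_iff, List.length_eq_zero_iff.mp hm]
      exact List.nil_prefix
    rw [hfil, Nat.sub_zero,
      show ((molecule.toList.length : Int) + 1)
        = ((0 + (molecule.toList.length + 1) : Nat) : Int) by push_cast; ring,
      show (0 : Int) = ((0 : Nat) : Int) from rfl,
      pvPyRange_eq (molecule.toList.length + 1) 0, List.map_map]
    congr 1
    apply List.map_congr_left
    intro i _
    unfold pvBuild
    rw [PySem.Str.len_eq, hm]
    norm_num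
  · rw [if_neg hm]
    by_cases hnm : molecule.toList.length < sub.1.toList.length
    · rw [if_pos hnm]
      unfold pvElems
      have hfil : (List.range' 0 (molecule.toList.length + 1 - 0)).filter
          (fun i => PySem.Chars.startswith (molecule.toList.drop i) sub.1.toList) = [] := by
        rw [List.filter_eq_nil_iff]
        intro i hi
        obtain ⟨_, hilt⟩ := List.mem_range'_1.mp hi
        exact pvPredFalse sub molecule i (by omega) (by omega)
      rw [hfil]
      rfl
    · rw [if_neg hnm]
      have hm' : 0 < sub.1.toList.length := by omega
      have hmn : sub.1.toList.length ≤ molecule.toList.length := by omega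
      have hzip : List.zip molecule.toList (molecule.toList.drop sub.1.toList.length)
          = List.zip (molecule.toList.drop 0)
              (molecule.toList.drop (0 + sub.1.toList.length)) := by
        simp
      have htake : molecule.toList.take sub.1.toList.length
          = (molecule.toList.drop 0).take sub.1.toList.length := by simp
      rw [hzip, htake, show (0 : Int) = ((0 : Nat) : Int) from rfl]
      rw [pvAltLoop sub molecule hm' (molecule.toList.length - sub.1.toList.length) 0 _
        (by omega)]
      unfold pvElems
      rw [Nat.sub_zero, pvFilterShort sub molecule hm' hmn]
      rw [show molecule.toList.length - sub.1.toList.length + 1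
          = (molecule.toList.length - sub.1.toList.length) + 1 from rfl,
        List.range'_succ, List.filter_cons]
      have hsl0 : (PySem.Str.slice molecule none (some ((sub.1.toList.length : Nat) : Int))
            = sub.1)
          ↔ (molecule.toList.drop 0).take sub.1.toList.length = sub.1.toList := by
        rw [PySem.Str.slice,
          show PySem.Chars.slice molecule.toList none (some ((sub.1.toList.length : Nat) : Int))
              = (molecule.toList.drop 0).take sub.1.toList.length by
            rw [show PySem.Chars.slice molecule.toList none
                  (some ((sub.1.toList.length : Nat) : Int))
                = molecule.toList.take sub.1.toList.length from
                PySem.List.slice_to_natCast molecule.toList sub.1.toList.length]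
            simp]
        constructor
        · intro h
          have h2 := congrArg String.toList h
          rwa [String.toList_ofList] at h2
        · intro h
          rw [h, String.ofList_toList]
      have hiff0 : (cnmB_hash ((molecule.toList.drop 0).take sub.1.toList.length)
            = cnmB_hash sub.1.toList ∧
          PySem.Str.slice molecule none (some ((sub.1.toList.length : Nat) : Int)) = sub.1)
          ↔ PySem.Chars.startswith (molecule.toList.drop 0) sub.1.toList = true := by
        rw [hsl0, pvPredIff]
        exact ⟨fun h => h.2, fun hw => ⟨by rw [hw], hw⟩⟩
      have hb0 : pvBuild sub molecule ((0 : Nat) : Int)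
          = sub.2 ++ PySem.Str.slice molecule (some ((sub.1.toList.length : Nat) : Int)) none := by
        unfold pvBuild
        rw [PySem.Str.len_eq]
        simp only [Nat.cast_zero, zero_add]
        exact pvSliceZero molecule sub.2 _
      by_cases hsw : PySem.Chars.startswith (molecule.toList.drop 0) sub.1.toList = true
      · rw [if_pos (hiff0.mpr hsw), if_pos hsw, List.map_cons,
          ← PySem.Set.update_nil_left, PySem.Set.update_cons, hb0]
        rfl
      · rw [if_neg (fun hc => hsw (hiff0.mp hc)), if_neg hsw,
          ← PySem.Set.update_nil_left]
        rfl

-- ===== VERDICT (by name: the statement is the Claim_ definition above) =====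
theorem create_new_molecules_spec : Claim_equal_create_new_molecules := by
  intro sub molecule _
  unfold Spec_create_new_molecules create_new_molecules
  rw [pvAlt_eq, PySem.Str.find_eq, ← PySem.Chars.findFrom_zero,
    show (0 : Int) = ((0 : Nat) : Int) from rfl,
    pvLoop_eq sub molecule (molecule.toList.length + 2) 0 PySem.Set.empty (by omega) (by omega)]
  rfl
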